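-- pv_equiv track=rewrite | github.com/voodoocjl/VQC_QRC | FusionModel.py | single_enta_to_design
-- ===== SOURCE A (Python) =====
-- def single_enta_to_design(single, enta, arch_code, fold=1):
--     """
--     Generate a design list usable by QNET from single and enta codes
--
--     Args:
--         single: Single-qubit gate encoding, format: [[qubit, gate_config_layer0, gate_config_layer1, ...], ...]
--                 Each two bits of gate_config represent a layer: 00=Identity, 01=U3, 10=data, 11=data+U3
--         enta: Two-qubit gate encoding, format: [[qubit, target_layer0, target_layer1, ...], ...]
--               Each value represents the target qubit position in that layer
--         arch_code_fold: [n_qubits, n_layers]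
--
--     Returns:
--         design: List containing quantum circuit design info, each element is (gate_type, [wire_indices], layer)
--     """
--     design = []
--     single = qubit_fold(single, 0, fold)
--     enta = qubit_fold(enta, 1, fold)
--
--     n_qubits, n_layers = arch_code
--
--     # Process each layer
--     for layer in range(n_layers):
--         # First process single-qubit gates
--         for qubit_config in single:
--             qubit = qubit_config[0] - 1  # Convert to 0-based index
--             # The config for each layer is at position: 1 + layer*2 and 1 + layer*2 + 1
--             config_start_idx = 1 + layer
--             if config_start_idx + 1 < len(qubit_config):
--                 gate_config = f"{qubit_config[config_start_idx]}"
--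
--                 if gate_config == '1':  # U3
--                     design.append(('U3', [qubit], layer))
--                 # 0 (Identity) skip
--
--         # Then process two-qubit gates
--         for qubit_config in enta:
--             control_qubit = qubit_config[0] - 1  # Convert to 0-based index
--             # The target qubit position in the list: 1 + layer
--             target_idx = 1 + layer
--             if target_idx < len(qubit_config):
--                 target_qubit = qubit_config[target_idx] - 1  # Convert to 0-based index
--
--                 # If control and target qubits are different, add C(U3) gate
--                 if control_qubit != target_qubit:
--                     design.append(('C(U3)', [control_qubit, target_qubit], layer))
--                 # If same, skip (equivalent to Identity)
--
--     return design
--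
-- def qubit_fold(jobs, phase, fold=1):
--     if fold > 1:
--         job_list = []
--         for job in jobs:
--             q = job[0]
--             if phase == 0:
--                 job_list.append([2*q] + job[1:])
--                 job_list.append([2*q-1] + job[1:])
--             else:
--                 job_1 = [2*q]
--                 job_2 = [2*q-1]
--                 for k in job[1:]:
--                     if q < k:
--                         job_1.append(2*k)
--                         job_2.append(2*k-1)
--                     elif q > k:
--                         job_1.append(2*k-1)
--                         job_2.append(2*k)
--                     else:
--                         job_1.append(2*q)
--                         job_2.append(2*q-1)
--                 job_list.append(job_1)
--                 job_list.append(job_2)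
--     else:
--         job_list = jobs
--     return job_list
-- ===== SOURCE B (Python) =====
-- def _fold_rows(jobs, phase, fold=1):
--     if fold <= 1:
--         return jobs
--     def pair(job):
--         q = job[0]
--         if phase == 0:
--             return [[2 * q] + job[1:], [2 * q - 1] + job[1:]]
--         hi = [2 * k if q < k else 2 * k - 1 if q > k else 2 * q for k in job[1:]]
--         lo = [2 * k - 1 if q < k else 2 * k if q > k else 2 * q - 1 for k in job[1:]]
--         return [[2 * q] + hi, [2 * q - 1] + lo]
--     return [row for job in jobs for row in pair(job)]
--
--
-- def single_enta_to_design(single, enta, arch_code, fold=1):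
--     """Config-major construction: one pass over each gate row distributes its
--     entries into per-layer buckets, then the layers are flattened in order
--     (per layer: all U3 entries, then all C(U3) entries)."""
--     n_qubits, n_layers = arch_code
--     singles = _fold_rows(single, 0, fold)
--     entas = _fold_rows(enta, 1, fold)
--     L = max(n_layers, 0)
--
--     u3_by_layer = [[] for _ in range(L)]
--     for row in singles:
--         for layer in range(min(L, len(row) - 2)):
--             if row[1 + layer] == 1:
--                 u3_by_layer[layer].append(('U3', [row[0] - 1], layer))
--
--     cu3_by_layer = [[] for _ in range(L)]
--     for row in entas:
--         for layer in range(min(L, len(row) - 1)):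
--             control, target = row[0] - 1, row[1 + layer] - 1
--             if control != target:
--                 cu3_by_layer[layer].append(('C(U3)', [control, target], layer))
--
--     design = []
--     for layer in range(L):
--         design += u3_by_layer[layer] + cu3_by_layer[layer]
--     return design
-- ===== Notes on version B (the rewrite author's own statement) =====
-- stated objective: alternative
-- what changed: A builds the design layer-major with nested loops (for each layer, scan all single rows then all enta rows, appending to one list); B is config-major: each folded row distributes its entries into per-layer buckets in one pass, and the design is the layer-ordered flatten of the U3 buckets followed by the C(U3) buckets; qubit_fold is rewritten as a flat comprehension over row pairs. Pre_ excludes exactly the inputs where A raises: arch_code not of length 2 (unpacking ValueError) and empty gate rows whenever they are indexed (IndexError).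
import Mathlib
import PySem

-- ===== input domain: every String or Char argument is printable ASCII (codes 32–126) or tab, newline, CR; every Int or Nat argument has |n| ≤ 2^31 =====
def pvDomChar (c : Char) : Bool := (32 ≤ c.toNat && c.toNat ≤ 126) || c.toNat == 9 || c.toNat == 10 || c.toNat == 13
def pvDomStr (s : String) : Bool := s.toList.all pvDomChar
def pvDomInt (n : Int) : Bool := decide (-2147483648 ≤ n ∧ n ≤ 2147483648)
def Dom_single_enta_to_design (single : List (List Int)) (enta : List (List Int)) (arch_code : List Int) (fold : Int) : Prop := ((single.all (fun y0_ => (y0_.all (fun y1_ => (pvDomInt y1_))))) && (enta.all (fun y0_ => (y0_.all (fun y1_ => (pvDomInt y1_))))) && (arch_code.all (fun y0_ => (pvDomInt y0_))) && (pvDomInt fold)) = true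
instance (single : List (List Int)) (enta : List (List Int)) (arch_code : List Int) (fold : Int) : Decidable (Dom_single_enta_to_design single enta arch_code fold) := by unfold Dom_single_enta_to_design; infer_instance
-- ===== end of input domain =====

-- B replaces A's layer-major nested loops by a config-major pass: each gate row
-- distributes its entries into per-layer buckets, flattened at the end
-- (objective: alternative decomposition, same cost).

-- ===== PORT A =====
-- literal port of qubit_fold (jobs[i][0] is read unguarded in Python; the port uses
-- pyGetD whose default is only reachable outside Pre_, where Python raises IndexError)
def qubitFoldA (jobs : List (List Int)) (phase : Int) (fold : Int) : List (List Int) :=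
  if 1 < fold then
    jobs.foldl (fun job_list job =>
      let q := PySem.List.pyGetD job 0 0
      if phase = 0 then
        (job_list ++ [[2*q] ++ PySem.List.slice job (some 1) none]) ++
          [[2*q - 1] ++ PySem.List.slice job (some 1) none]
      else
        let p := (PySem.List.slice job (some 1) none).foldl
          (fun (s : List Int × List Int) k =>
            if q < k then (s.1 ++ [2*k], s.2 ++ [2*k - 1])
            else if q > k then (s.1 ++ [2*k - 1], s.2 ++ [2*k])
            else (s.1 ++ [2*q], s.2 ++ [2*q - 1]))
          ([2*q], [2*q - 1])
        (job_list ++ [p.1]) ++ [p.2])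
      []
  else jobs

def single_enta_to_design (single : List (List Int)) (enta : List (List Int)) (arch_code : List Int) (fold : Int) : List (String × List Int × Int) :=
  let single' := qubitFoldA single 0 fold
  let enta' := qubitFoldA enta 1 fold
  -- n_qubits, n_layers = arch_code  (n_qubits is never used)
  let n_layers := PySem.List.pyGetD arch_code 1 0
  (PySem.List.pyRange 0 n_layers 1).foldl (fun design layer =>
    let d1 := single'.foldl (fun d qubit_config =>
      let qubit := PySem.List.pyGetD qubit_config 0 0 - 1
      let config_start_idx := 1 + layer
      if config_start_idx + 1 < PySem.List.len qubit_config then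
        if PySem.Int.toStr (PySem.List.pyGetD qubit_config config_start_idx 0) == "1" then
          d ++ [("U3", [qubit], layer)]
        else d
      else d) design
    enta'.foldl (fun d qubit_config =>
      let control_qubit := PySem.List.pyGetD qubit_config 0 0 - 1
      let target_idx := 1 + layer
      if target_idx < PySem.List.len qubit_config then
        let target_qubit := PySem.List.pyGetD qubit_config target_idx 0 - 1
        if control_qubit ≠ target_qubit then
          d ++ [("C(U3)", [control_qubit, target_qubit], layer)]
        else d
      else d) d1)
    []

-- ===== PORT B =====
-- literal port of Source B's _fold_rows (comprehension-based)
def foldRowsB (jobs : List (List Int)) (phase : Int) (fold : Int) : List (List Int) :=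
  if fold ≤ 1 then jobs
  else
    jobs.flatMap (fun job =>
      let q := PySem.List.pyGetD job 0 0
      let t := PySem.List.slice job (some 1) none
      if phase = 0 then
        [[2*q] ++ t, [2*q - 1] ++ t]
      else
        let hi := t.map (fun k => if q < k then 2*k else if q > k then 2*k - 1 else 2*q)
        let lo := t.map (fun k => if q < k then 2*k - 1 else if q > k then 2*k else 2*q - 1)
        [[2*q] ++ hi, [2*q - 1] ++ lo])

-- literal port of Source B's single_enta_to_design: fill per-layer buckets
-- (buckets[layer].append(x) = pySetD buckets layer (buckets[layer] ++ [x])), then flatten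
def single_enta_to_design_alt (single : List (List Int)) (enta : List (List Int)) (arch_code : List Int) (fold : Int) : List (String × List Int × Int) :=
  let n_layers := PySem.List.pyGetD arch_code 1 0
  let singles := foldRowsB single 0 fold
  let entas := foldRowsB enta 1 fold
  let L := max n_layers 0
  let u3_by_layer := singles.foldl (fun bs row =>
      (PySem.List.pyRange 0 (min L (PySem.List.len row - 2)) 1).foldl (fun bs layer =>
        if PySem.List.pyGetD row (1 + layer) 0 = 1 then
          PySem.List.pySetD bs layer
            (PySem.List.pyGetD bs layer [] ++ [("U3", [PySem.List.pyGetD row 0 0 - 1], layer)])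
        else bs) bs)
    ((PySem.List.pyRange 0 L 1).map (fun _ => ([] : List (String × List Int × Int))))
  let cu3_by_layer := entas.foldl (fun bs row =>
      (PySem.List.pyRange 0 (min L (PySem.List.len row - 1)) 1).foldl (fun bs layer =>
        let control := PySem.List.pyGetD row 0 0 - 1
        let target := PySem.List.pyGetD row (1 + layer) 0 - 1
        if control ≠ target then
          PySem.List.pySetD bs layer
            (PySem.List.pyGetD bs layer [] ++ [("C(U3)", [control, target], layer)])
        else bs) bs)
    ((PySem.List.pyRange 0 L 1).map (fun _ => ([] : List (String × List Int × Int))))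
  (PySem.List.pyRange 0 L 1).foldl (fun design layer =>
    design ++ (PySem.List.pyGetD u3_by_layer layer [] ++ PySem.List.pyGetD cu3_by_layer layer []))
    []

-- ===== PRECONDITION & SPEC =====
-- Pre_ excludes exactly the inputs where Python A raises: arch_code not of length 2
-- (unpacking raises ValueError), and an empty gate row whenever it is actually indexed
-- (always when fold > 1; in the layer loop when n_layers ≥ 1), which raises IndexError.
def Pre_single_enta_to_design (single : List (List Int)) (enta : List (List Int)) (arch_code : List Int) (fold : Int) : Prop :=
  arch_code.length = 2 ∧
    ((1 < fold ∨ 1 ≤ PySem.List.pyGetD arch_code 1 0) → ∀ row ∈ single ++ enta, row ≠ [])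
instance (single : List (List Int)) (enta : List (List Int)) (arch_code : List Int) (fold : Int) : Decidable (Pre_single_enta_to_design single enta arch_code fold) := by unfold Pre_single_enta_to_design; infer_instance
def pvWitness_single_enta_to_design : List (List Int) × List (List Int) × List Int × Int :=
  ([[1, 1, 0]], [[1, 2, 2]], [2, 2], 1)

def Spec_single_enta_to_design (single : List (List Int)) (enta : List (List Int)) (arch_code : List Int) (fold : Int) (out : List (String × List Int × Int)) : Prop := out = single_enta_to_design_alt single enta arch_code fold
instance (single : List (List Int)) (enta : List (List Int)) (arch_code : List Int) (fold : Int) (out : List (String × List Int × Int)) : Decidable (Spec_single_enta_to_design single enta arch_code fold out) := by unfold Spec_single_enta_to_design; infer_instance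

-- ===== CLAIM (what is proved, stated in full; the proofs are below) =====
def Claim_equal_single_enta_to_design : Prop := ∀ (single : List (List Int)) (enta : List (List Int)) (arch_code : List Int) (fold : Int), Dom_single_enta_to_design single enta arch_code fold → Pre_single_enta_to_design single enta arch_code fold → Spec_single_enta_to_design single enta arch_code fold (single_enta_to_design single enta arch_code fold)
-- ===== LEMMAS AND PROOFS =====

-- str(v) == '1' is v == 1
lemma tdc_len_mono : ∀ (f n : Nat) (l : List Char), l.length ≤ (Nat.toDigitsCore 10 f n l).length := by
  intro f
  induction f with
  | zero => intro n l; simp [Nat.toDigitsCore]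
  | succ f ih =>
    intro n l
    simp only [Nat.toDigitsCore]
    split
    · simp
    · exact le_trans (by simp) (ih (n / 10) (Nat.digitChar (n % 10) :: l))

lemma tdc_len_succ (f n : Nat) (l : List Char) (hf : 1 ≤ f) :
    l.length + 1 ≤ (Nat.toDigitsCore 10 f n l).length := by
  obtain ⟨f', rfl⟩ : ∃ f', f = f' + 1 := ⟨f - 1, by omega⟩
  simp only [Nat.toDigitsCore]
  split
  · simp
  · exact le_trans (by simp) (tdc_len_mono f' (n / 10) (Nat.digitChar (n % 10) :: l))

lemma toDigits10_two_le (m : Nat) (h : 10 ≤ m) : 2 ≤ (Nat.toDigits 10 m).length := by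
  show 2 ≤ (Nat.toDigitsCore 10 (m + 1) m []).length
  rw [Nat.toDigitsCore]
  have hd : ¬ m / 10 = 0 := by omega
  simp only [hd, if_false]
  exact tdc_len_succ m (m / 10) [Nat.digitChar (m % 10)] (by omega)

lemma toDigits10_lt_ten (m : Nat) (h : m < 10) : Nat.toDigits 10 m = [Nat.digitChar m] := by
  show Nat.toDigitsCore 10 (m + 1) m [] = _
  rw [Nat.toDigitsCore]
  have hd : m / 10 = 0 := by omega
  simp [hd, Nat.mod_eq_of_lt h]

lemma toStr_eq_one_iff (v : Int) : PySem.Int.toStr v = "1" ↔ v = 1 := by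
  constructor
  · intro h
    have h2 : PySem.Int.toChars v = ['1'] := by
      have := congrArg String.toList h
      simpa [PySem.Int.toList_toStr] using this
    unfold PySem.Int.toChars at h2
    split at h2
    · simp at h2
    · rename_i hneg
      by_cases hge : 10 ≤ v.toNat
      · have := toDigits10_two_le v.toNat hge
        rw [h2] at this; simp at this
      · rw [toDigits10_lt_ten v.toNat (by omega)] at h2
        have hc : Nat.digitChar v.toNat = '1' := by simpa using h2
        have hv : v.toNat = 1 := by
          interval_cases h : v.toNat <;> simp_all [Nat.digitChar]
        omega
  · rintro rfl; rfl

-- the two qubit_fold implementations agree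
lemma pair_fold (t : List Int) (q : Int) :
    t.foldl (fun (s : List Int × List Int) k =>
        if q < k then (s.1 ++ [2*k], s.2 ++ [2*k - 1])
        else if q > k then (s.1 ++ [2*k - 1], s.2 ++ [2*k])
        else (s.1 ++ [2*q], s.2 ++ [2*q - 1])) ([2*q], [2*q - 1]) =
      ([2*q] ++ t.map (fun k => if q < k then 2*k else if q > k then 2*k - 1 else 2*q),
       [2*q - 1] ++ t.map (fun k => if q < k then 2*k - 1 else if q > k then 2*k else 2*q - 1)) := by
  have hb : (fun (s : List Int × List Int) k =>
        if q < k then (s.1 ++ [2*k], s.2 ++ [2*k - 1])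
        else if q > k then (s.1 ++ [2*k - 1], s.2 ++ [2*k])
        else (s.1 ++ [2*q], s.2 ++ [2*q - 1])) =
      (fun (s : List Int × List Int) k =>
        (s.1 ++ [if q < k then 2*k else if q > k then 2*k - 1 else 2*q],
         s.2 ++ [if q < k then 2*k - 1 else if q > k then 2*k else 2*q - 1])) := by
    funext s k; split_ifs <;> rfl
  rw [hb, PySem.List.foldl_prod_mk (f := fun l k => l ++ [if q < k then 2*k else if q > k then 2*k - 1 else 2*q]) (g := fun l k => l ++ [if q < k then 2*k - 1 else if q > k then 2*k else 2*q - 1])]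
  rw [PySem.List.foldl_append_singleton_eq_map, PySem.List.foldl_append_singleton_eq_map]

lemma fold_eq (jobs : List (List Int)) (phase : Int) (fold : Int) :
    qubitFoldA jobs phase fold = foldRowsB jobs phase fold := by
  unfold qubitFoldA foldRowsB
  by_cases h : 1 < fold
  · rw [if_pos h, if_neg (by omega)]
    refine Eq.trans (PySem.List.foldl_congr_mem _ _ (fun jl job =>
      jl ++ (let q := PySem.List.pyGetD job 0 0
             let t := PySem.List.slice job (some 1) none
             if phase = 0 then
               [[2*q] ++ t, [2*q - 1] ++ t]
             else
               let hi := t.map (fun k => if q < k then 2*k else if q > k then 2*k - 1 else 2*q)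
               let lo := t.map (fun k => if q < k then 2*k - 1 else if q > k then 2*k else 2*q - 1)
               [[2*q] ++ hi, [2*q - 1] ++ lo])) _ ?_) ?_
    · intro acc job _
      dsimp only
      by_cases hph : phase = 0
      · simp [hph]
      · rw [if_neg hph, if_neg hph, pair_fold]
        simp
    · rw [PySem.List.foldl_append_eq_flatMap]
      simp
  · rw [if_neg h, if_pos (by omega)]

-- pyRange 0 m 1 only depends on m through its toNat
lemma pyRange_zero_toNat (m : Int) :
    PySem.List.pyRange 0 m 1 = PySem.List.pyRange 0 ((m.toNat : Nat) : Int) 1 := by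
  by_cases h : m ≤ 0
  · rw [PySem.List.pyRange_one_eq_nil h, PySem.List.pyRange_one_eq_nil (by omega)]
  · rw [Int.toNat_of_nonneg (by omega)]

-- B's inner bucket-filling loop preserves the bucket count
lemma inner_len {α : Type} (C : Int → Prop) [inst : ∀ i, Decidable (C i)] (e : Int → α)
    (ls : List Int) : ∀ (bs : List (List α)),
    (ls.foldl (fun bs l =>
        if C l then PySem.List.pySetD bs l (PySem.List.pyGetD bs l [] ++ [e l]) else bs) bs).length
      = bs.length := by
  induction ls with
  | nil => intro bs; rfl
  | cons x xs ih =>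
    intro bs
    rw [List.foldl_cons, ih]
    split
    · exact PySem.List.length_pySetD _ _ _
    · rfl

-- effect of B's inner loop (over range(n)) on one bucket
lemma inner_getD {α : Type} (C : Int → Prop) [inst : ∀ i, Decidable (C i)] (e : Int → α)
    (n : Nat) : ∀ (bs : List (List α)) (k : Nat), k < bs.length → n ≤ bs.length →
    PySem.List.pyGetD ((PySem.List.pyRange 0 (n : Int) 1).foldl
        (fun bs l => if C l then PySem.List.pySetD bs l (PySem.List.pyGetD bs l [] ++ [e l]) else bs) bs)
      (k : Int) [] =
      if (k : Int) < (n : Int) ∧ C (k : Int) then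
        PySem.List.pyGetD bs (k : Int) [] ++ [e (k : Int)]
      else PySem.List.pyGetD bs (k : Int) [] := by
  induction n with
  | zero =>
    intro bs k hk hn
    rw [PySem.List.pyRange_one_eq_nil (by omega), List.foldl_nil]
    rw [if_neg (by rintro ⟨h1, -⟩; omega)]
  | succ n ih =>
    intro bs k hk hn
    have hcast : ((n + 1 : Nat) : Int) = (n : Int) + 1 := by push_cast; ring
    rw [hcast, PySem.List.pyRange_one_succ_right (by omega), List.foldl_append,
      List.foldl_cons, List.foldl_nil]
    have hFlen : ((PySem.List.pyRange 0 (n : Int) 1).foldl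
        (fun bs l => if C l then PySem.List.pySetD bs l (PySem.List.pyGetD bs l [] ++ [e l]) else bs) bs).length
        = bs.length := inner_len C e _ bs
    by_cases hC : C (n : Int)
    · rw [if_pos hC]
      by_cases hkn : k = n
      · subst hkn
        rw [PySem.List.pyGetD_pySetD_natCast _ k k _ _ (by omega)]
        rw [if_pos rfl, ih bs k hk (by omega)]
        rw [if_neg (by omega), if_pos ⟨by omega, hC⟩]
      · rw [PySem.List.pyGetD_pySetD_natCast _ n k _ _ (by omega)]
        rw [if_neg hkn, ih bs k hk (by omega)]
        have hiff : ((k : Int) < (n : Int) ∧ C (k : Int)) ↔ ((k : Int) < (n : Int) + 1 ∧ C (k : Int)) := by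
          constructor
          · rintro ⟨h1, h2⟩; exact ⟨by omega, h2⟩
          · rintro ⟨h1, h2⟩; exact ⟨by omega, h2⟩
        rw [if_congr hiff rfl rfl]
    · rw [if_neg hC, ih bs k hk (by omega)]
      have hiff : ((k : Int) < (n : Int) ∧ C (k : Int)) ↔ ((k : Int) < (n : Int) + 1 ∧ C (k : Int)) := by
        constructor
        · rintro ⟨h1, h2⟩; exact ⟨by omega, h2⟩
        · rintro ⟨h1, h2⟩
          refine ⟨?_, h2⟩
          by_cases hkn : (k : Int) = (n : Int)
          · exact absurd (hkn ▸ h2) hC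
          · omega
      rw [if_congr hiff rfl rfl]

-- effect of B's row pass on one bucket: the filtered rows land there in list order
lemma bucket_fold_getD {α : Type} (C : List Int → Int → Prop) [inst : ∀ r i, Decidable (C r i)]
    (e : List Int → Int → α) (m : List Int → Int) (L : Int) (hm : ∀ row, m row ≤ L)
    (rs : List (List Int)) :
    ∀ (bs : List (List α)) (k : Nat), k < bs.length → bs.length = L.toNat →
      PySem.List.pyGetD (rs.foldl (fun bs row =>
          (PySem.List.pyRange 0 (m row) 1).foldl
            (fun bs l => if C row l then PySem.List.pySetD bs l (PySem.List.pyGetD bs l [] ++ [e row l]) else bs) bs) bs)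
        (k : Int) [] =
      PySem.List.pyGetD bs (k : Int) [] ++
        (rs.filter (fun r => decide ((k : Int) < m r ∧ C r (k : Int)))).map (fun r => e r (k : Int)) := by
  induction rs with
  | nil => intro bs k hk hL; simp
  | cons r rs ih =>
    intro bs k hk hL
    rw [List.foldl_cons, List.filter_cons]
    have hlen : ((PySem.List.pyRange 0 (m r) 1).foldl
        (fun bs l => if C r l then PySem.List.pySetD bs l (PySem.List.pyGetD bs l [] ++ [e r l]) else bs) bs).length
        = bs.length := inner_len (C r) (e r) _ bs
    rw [ih _ k (by rw [hlen]; exact hk) (by rw [hlen]; exact hL)]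
    rw [pyRange_zero_toNat (m r),
      inner_getD (C r) (e r) (m r).toNat bs k hk (by have := hm r; omega)]
    have hiff : ((k : Int) < ((m r).toNat : Int) ∧ C r (k : Int)) ↔ ((k : Int) < m r ∧ C r (k : Int)) := by
      constructor <;> rintro ⟨h1, h2⟩ <;> exact ⟨by omega, h2⟩
    by_cases h : (k : Int) < m r ∧ C r (k : Int)
    · rw [if_pos (hiff.mpr h)]
      simp [h, List.append_assoc]
    · rw [if_neg (fun hc => h (hiff.mp hc))]
      simp [h]

-- A's inner loops as filter-maps
lemma singles_fold (fs : List (List Int)) (layer : Int) (design : List (String × List Int × Int)) :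
    fs.foldl (fun d qubit_config =>
        let qubit := PySem.List.pyGetD qubit_config 0 0 - 1
        let config_start_idx := 1 + layer
        if config_start_idx + 1 < PySem.List.len qubit_config then
          if PySem.Int.toStr (PySem.List.pyGetD qubit_config config_start_idx 0) == "1" then
            d ++ [("U3", [qubit], layer)]
          else d
        else d) design =
      design ++ (fs.filter (fun row => decide (1 + layer + 1 < PySem.List.len row ∧ PySem.List.pyGetD row (1 + layer) 0 = 1))).map
        (fun row => (("U3", [PySem.List.pyGetD row 0 0 - 1], layer) : String × List Int × Int)) := by
  refine Eq.trans (PySem.List.foldl_congr_mem _ _ (fun d row =>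
      if 1 + layer + 1 < PySem.List.len row ∧ PySem.List.pyGetD row (1 + layer) 0 = 1
      then d ++ [("U3", [PySem.List.pyGetD row 0 0 - 1], layer)] else d) _ ?_) ?_
  · intro acc row _
    dsimp only
    simp only [PySem.List.len_eq]
    by_cases h1 : 1 + layer + 1 < (row.length : Int)
    · by_cases h2 : PySem.List.pyGetD row (1 + layer) 0 = 1
      · simp [h1, h2, toStr_eq_one_iff]
      · simp [h1, h2, toStr_eq_one_iff]
    · simp [h1]
  · exact PySem.List.foldl_append_ite _ _ _ _

lemma entas_fold (fe : List (List Int)) (layer : Int) (design : List (String × List Int × Int)) :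
    fe.foldl (fun d qubit_config =>
        let control_qubit := PySem.List.pyGetD qubit_config 0 0 - 1
        let target_idx := 1 + layer
        if target_idx < PySem.List.len qubit_config then
          let target_qubit := PySem.List.pyGetD qubit_config target_idx 0 - 1
          if control_qubit ≠ target_qubit then
            d ++ [("C(U3)", [control_qubit, target_qubit], layer)]
          else d
        else d) design =
      design ++ (fe.filter (fun row => decide (1 + layer < PySem.List.len row ∧ ¬ (PySem.List.pyGetD row 0 0 - 1 = PySem.List.pyGetD row (1 + layer) 0 - 1)))).map
        (fun row => (("C(U3)", [PySem.List.pyGetD row 0 0 - 1, PySem.List.pyGetD row (1 + layer) 0 - 1], layer) : String × List Int × Int)) := by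
  refine Eq.trans (PySem.List.foldl_congr_mem _ _ (fun d row =>
      if 1 + layer < PySem.List.len row ∧ ¬ (PySem.List.pyGetD row 0 0 - 1 = PySem.List.pyGetD row (1 + layer) 0 - 1)
      then d ++ [("C(U3)", [PySem.List.pyGetD row 0 0 - 1, PySem.List.pyGetD row (1 + layer) 0 - 1], layer)] else d) _ ?_) ?_
  · intro acc row _
    dsimp only
    simp only [PySem.List.len_eq]
    by_cases h1 : 1 + layer < (row.length : Int)
    · by_cases h2 : PySem.List.pyGetD row 0 0 - 1 = PySem.List.pyGetD row (1 + layer) 0 - 1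
      · simp [h1, h2]
      · simp [h1, h2]
    · simp [h1]
  · exact PySem.List.foldl_append_ite _ _ _ _

-- ===== VERDICT (by name: the statement is the Claim_ definition above) =====
theorem single_enta_to_design_spec : Claim_equal_single_enta_to_design := by
  intro single enta arch_code fold _ _
  unfold Spec_single_enta_to_design single_enta_to_design single_enta_to_design_alt
  dsimp only
  rw [fold_eq, fold_eq]
  set L := max (PySem.List.pyGetD arch_code 1 0) 0 with hLdef
  have hrange : PySem.List.pyRange 0 (PySem.List.pyGetD arch_code 1 0) 1 =
      PySem.List.pyRange 0 L 1 := by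
    by_cases h : PySem.List.pyGetD arch_code 1 0 ≤ 0
    · rw [PySem.List.pyRange_one_eq_nil h, PySem.List.pyRange_one_eq_nil (by omega)]
    · rw [hLdef, max_eq_left (by omega)]
  rw [hrange]
  refine PySem.List.foldl_congr_mem _ _ _ _ ?_
  intro design layer hlay
  obtain ⟨h0, hL⟩ := PySem.List.mem_pyRange_one.mp hlay
  rw [singles_fold, entas_fold]
  have hcast : layer = ((layer.toNat : Nat) : Int) := (Int.toNat_of_nonneg h0).symm
  rw [hcast]
  have hinitlen : ((PySem.List.pyRange 0 L 1).map
      (fun _ => ([] : List (String × List Int × Int)))).length = L.toNat := by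
    simp [PySem.List.length_pyRange_one]
  rw [bucket_fold_getD
        (C := fun row i => PySem.List.pyGetD row (1 + i) 0 = 1)
        (e := fun row i => (("U3", [PySem.List.pyGetD row 0 0 - 1], i) : String × List Int × Int))
        (m := fun row => min L (PySem.List.len row - 2)) L (fun row => min_le_left _ _)
        _ _ layer.toNat (by omega) hinitlen,
      bucket_fold_getD
        (C := fun row i => ¬ (PySem.List.pyGetD row 0 0 - 1 = PySem.List.pyGetD row (1 + i) 0 - 1))
        (e := fun row i => (("C(U3)", [PySem.List.pyGetD row 0 0 - 1, PySem.List.pyGetD row (1 + i) 0 - 1], i) : String × List Int × Int))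
        (m := fun row => min L (PySem.List.len row - 1)) L (fun row => min_le_left _ _)
        _ _ layer.toNat (by omega) hinitlen]
  rw [PySem.List.pyGetD_map_pyRange_of_nonneg _ _ _ _ (by omega) (by omega)]
  have hf1 : (foldRowsB single 0 fold).filter
        (fun row => decide (1 + ((layer.toNat : Nat) : Int) + 1 < PySem.List.len row ∧ PySem.List.pyGetD row (1 + ((layer.toNat : Nat) : Int)) 0 = 1)) =
      (foldRowsB single 0 fold).filter
        (fun row => decide (((layer.toNat : Nat) : Int) < min L (PySem.List.len row - 2) ∧ PySem.List.pyGetD row (1 + ((layer.toNat : Nat) : Int)) 0 = 1)) := by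
    refine List.filter_congr ?_
    intro row _
    simp only [decide_eq_decide, PySem.List.len_eq]
    constructor
    · rintro ⟨h1, h2⟩; exact ⟨by omega, h2⟩
    · rintro ⟨h1, h2⟩; exact ⟨by omega, h2⟩
  have hf2 : (foldRowsB enta 1 fold).filter
        (fun row => decide (1 + ((layer.toNat : Nat) : Int) < PySem.List.len row ∧ ¬ (PySem.List.pyGetD row 0 0 - 1 = PySem.List.pyGetD row (1 + ((layer.toNat : Nat) : Int)) 0 - 1))) =
      (foldRowsB enta 1 fold).filter
        (fun row => decide (((layer.toNat : Nat) : Int) < min L (PySem.List.len row - 1) ∧ ¬ (PySem.List.pyGetD row 0 0 - 1 = PySem.List.pyGetD row (1 + ((layer.toNat : Nat) : Int)) 0 - 1))) := by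
    refine List.filter_congr ?_
    intro row _
    simp only [decide_eq_decide, PySem.List.len_eq]
    constructor
    · rintro ⟨h1, h2⟩; exact ⟨by omega, h2⟩
    · rintro ⟨h1, h2⟩; exact ⟨by omega, h2⟩
  rw [hf1, hf2]
  simp [List.append_assoc]
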